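-- pv_equiv track=rewrite | github.com/pierrellompart21/amsterdam-rent-scraper | src/amsterdam_rent_scraper/utils/neighborhoods.py | normalize_neighborhood_name
-- ===== SOURCE A (Python) =====
-- def normalize_neighborhood_name(name: str, target_city: str = "amsterdam") -> str:
--     """Normalize a neighborhood name for lookup."""
--     if not name:
--         return ""
--     # Lowercase and strip
--     normalized = name.lower().strip()
--     # Remove common prefixes based on city
--     if target_city == "amsterdam":
--         for prefix in ["amsterdam ", "amsterdam-"]:
--             if normalized.startswith(prefix):
--                 normalized = normalized[len(prefix):]
--     elif target_city == "helsinki":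
--         for prefix in ["helsinki ", "helsinki-", "espoo ", "espoo-"]:
--             if normalized.startswith(prefix):
--                 normalized = normalized[len(prefix):]
--     elif target_city == "stockholm":
--         for prefix in ["stockholm ", "stockholm-", "stockholms "]:
--             if normalized.startswith(prefix):
--                 normalized = normalized[len(prefix):]
--     return normalized
-- ===== SOURCE B (Python) =====
-- _CITY_PREFIXES = {
--     "amsterdam": ["amsterdam ", "amsterdam-"],
--     "helsinki": ["helsinki ", "helsinki-", "espoo ", "espoo-"],
--     "stockholm": ["stockholm ", "stockholm-", "stockholms "],
-- }
--
--
-- def _strip_prefixes(s, prefixes):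
--     """Strip each matching prefix in sequence, recursively."""
--     if not prefixes:
--         return s
--     head = prefixes[0]
--     if s.startswith(head):
--         s = s[len(head):]
--     return _strip_prefixes(s, prefixes[1:])
--
--
-- def normalize_neighborhood_name(name: str, target_city: str = "amsterdam") -> str:
--     """Normalize a neighborhood name for lookup."""
--     return _strip_prefixes(name.lower().strip(), _CITY_PREFIXES.get(target_city, []))
-- ===== Notes on version B (the rewrite author's own statement) =====
-- stated objective: idiomatic
-- what changed: Replaced the three-way if/elif ladder of imperative prefix loops with a city->prefixes lookup table plus a single recursive prefix-stripping helper; the explicit empty-name special case disappears since the lower/strip/strip-prefixes pipeline already yields the empty string there.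
import Mathlib
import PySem

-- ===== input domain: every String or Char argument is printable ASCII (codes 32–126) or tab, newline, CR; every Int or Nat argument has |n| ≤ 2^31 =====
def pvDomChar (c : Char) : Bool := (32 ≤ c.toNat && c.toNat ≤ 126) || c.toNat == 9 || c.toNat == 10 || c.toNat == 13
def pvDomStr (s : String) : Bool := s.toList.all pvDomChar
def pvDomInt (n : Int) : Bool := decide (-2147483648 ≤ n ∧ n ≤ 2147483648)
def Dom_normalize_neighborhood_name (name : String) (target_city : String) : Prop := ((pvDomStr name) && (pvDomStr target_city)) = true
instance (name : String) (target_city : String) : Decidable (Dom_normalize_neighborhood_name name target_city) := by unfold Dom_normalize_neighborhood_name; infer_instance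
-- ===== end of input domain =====

-- B replaces A's three-way if/elif ladder of imperative prefix loops by a city→prefixes table
-- plus one recursive prefix-stripping helper (idiomatic; same cost).


-- ===== PORT A =====
-- one iteration of A's inner 'for prefix in …' loop body
def pvAStep (normalized : String) (p : String) : String :=
  if PySem.Str.startswith normalized p then
    PySem.Str.slice normalized (some (PySem.Str.len p)) none
  else normalized

def normalize_neighborhood_name (name : String) (target_city : String) : String :=
  if name = "" then ""
  else
    let normalized := PySem.Str.strip (PySem.Str.lower name)
    if target_city = "amsterdam" then
      ["amsterdam ", "amsterdam-"].foldl pvAStep normalized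
    else if target_city = "helsinki" then
      ["helsinki ", "helsinki-", "espoo ", "espoo-"].foldl pvAStep normalized
    else if target_city = "stockholm" then
      ["stockholm ", "stockholm-", "stockholms "].foldl pvAStep normalized
    else normalized

-- ===== PORT B =====
def pvCityPrefixes : PySem.Dict String (List String) :=
  PySem.Dict.mk
    [("amsterdam", ["amsterdam ", "amsterdam-"]),
     ("helsinki", ["helsinki ", "helsinki-", "espoo ", "espoo-"]),
     ("stockholm", ["stockholm ", "stockholm-", "stockholms "])]

def pvStripPrefixes : String → List String → String
  | s, [] => s
  | s, head :: rest =>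
    pvStripPrefixes
      (if PySem.Str.startswith s head then
        PySem.Str.slice s (some (PySem.Str.len head)) none
      else s) rest

def normalize_neighborhood_name_alt (name : String) (target_city : String) : String :=
  pvStripPrefixes (PySem.Str.strip (PySem.Str.lower name)) (pvCityPrefixes.getD target_city [])

-- ===== PRECONDITION & SPEC =====
def Spec_normalize_neighborhood_name (name : String) (target_city : String) (out : String) : Prop := out = normalize_neighborhood_name_alt name target_city
instance (name : String) (target_city : String) (out : String) : Decidable (Spec_normalize_neighborhood_name name target_city out) := by unfold Spec_normalize_neighborhood_name; infer_instance

-- ===== CLAIM (what is proved, stated in full; the proofs are below) =====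
def Claim_equal_normalize_neighborhood_name : Prop := ∀ (name : String) (target_city : String), Dom_normalize_neighborhood_name name target_city → Spec_normalize_neighborhood_name name target_city (normalize_neighborhood_name name target_city)

-- ===== LEMMAS AND PROOFS =====
theorem pvStrip_eq_foldl (s : String) (ps : List String) :
    pvStripPrefixes s ps = ps.foldl pvAStep s := by
  induction ps generalizing s with
  | nil => rfl
  | cons p rest ih => simpa [pvStripPrefixes, List.foldl, pvAStep] using ih _

theorem pvGetD_other (tc : String) (h1 : tc ≠ "amsterdam") (h2 : tc ≠ "helsinki")
    (h3 : tc ≠ "stockholm") : pvCityPrefixes.getD tc [] = [] := by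
  simp [pvCityPrefixes, PySem.Dict.getD, PySem.Dict.get?,
    Ne.symm h1, Ne.symm h2, Ne.symm h3]

theorem pvStripLowerEmpty : PySem.Str.strip (PySem.Str.lower "") = "" := by decide

-- ===== VERDICT (by name: the statement is the Claim_ definition above) =====
theorem normalize_neighborhood_name_spec : Claim_equal_normalize_neighborhood_name := by
  intro name tc _
  unfold Spec_normalize_neighborhood_name normalize_neighborhood_name normalize_neighborhood_name_alt
  by_cases h1 : tc = "amsterdam"
  · subst h1
    by_cases hn : name = ""
    · subst hn; decide
    · rw [if_neg hn]; simp [pvStrip_eq_foldl, pvCityPrefixes, PySem.Dict.getD, PySem.Dict.get?]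
  · by_cases h2 : tc = "helsinki"
    · subst h2
      by_cases hn : name = ""
      · subst hn; decide
      · rw [if_neg hn]; simp [pvStrip_eq_foldl, pvCityPrefixes, PySem.Dict.getD, PySem.Dict.get?]
    · by_cases h3 : tc = "stockholm"
      · subst h3
        by_cases hn : name = ""
        · subst hn; decide
        · rw [if_neg hn]; simp [pvStrip_eq_foldl, pvCityPrefixes, PySem.Dict.getD, PySem.Dict.get?]
      · rw [pvGetD_other tc h1 h2 h3]
        by_cases hn : name = ""
        · subst hn; simp [pvStripPrefixes, pvStripLowerEmpty]
        · simp [hn, h1, h2, h3, pvStripPrefixes]
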